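-- pv_equiv track=rewrite | github.com/DavidBartram/advent-of-code | 2021/day12-2.py | dfs
-- ===== SOURCE A (Python) =====
-- def dfs(graph, node, target, path, paths, revisits):
--
--     if node in path and node.islower():
--         revisits = False
--
--     path.append(node)
--
--     if node == target:
--         paths.append(path[:]) #append a copy of the current path, not a pointer to the path variable which keeps changing
--
--     else:
--         for neighbour in graph[node]:
--
--             if revisits == True:
--                 valid_neighbour = not (neighbour == 'start')
--             else:
--                 valid_neighbour = not (neighbour in path and neighbour.islower())
--
--             if valid_neighbour:
--                 dfs(graph,neighbour,target,path, paths, revisits)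
--
--     #we are using the same path variable for all the recursive calls
--     #when a function call completes, we want to leave the path the way we found it
--     #so remove the node we appended above
--     path.pop()
--
--     return paths
-- ===== SOURCE B (Python) =====
-- # B: iterative DFS with an explicit stack of (node, path-copy, revisits) frames
-- # instead of A's recursion on a shared mutable path; same return value in the same
-- # order (A also mutates `path` in place, B leaves it untouched; both append to `paths`).
-- def dfs(graph, node, target, path, paths, revisits):
--     stack = [(node, list(path), revisits)]
--     while stack:
--         nd, p, rev = stack.pop()
--         if nd in p and nd.islower():
--             rev = False
--         p = p + [nd]
--         if nd == target:
--             paths.append(p)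
--         else:
--             for nb in reversed(graph[nd]):
--                 if (nb != 'start') if rev else not (nb in p and nb.islower()):
--                     stack.append((nb, p, rev))
--     return paths
-- ===== Notes on version B (the rewrite author's own statement) =====
-- stated objective: alternative
-- what changed: Replaces the recursive DFS on a shared mutable path by an iterative DFS over an explicit stack of (node, path-copy, revisits) frames, pushing valid neighbours in reverse so the output order is identical.
-- outside the precondition, e.g. on dfs({'a': ['end', 'zz'], 'end': []}, 'a', 'end', [], [], True): A raises KeyError, B raises KeyError
import Mathlib
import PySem

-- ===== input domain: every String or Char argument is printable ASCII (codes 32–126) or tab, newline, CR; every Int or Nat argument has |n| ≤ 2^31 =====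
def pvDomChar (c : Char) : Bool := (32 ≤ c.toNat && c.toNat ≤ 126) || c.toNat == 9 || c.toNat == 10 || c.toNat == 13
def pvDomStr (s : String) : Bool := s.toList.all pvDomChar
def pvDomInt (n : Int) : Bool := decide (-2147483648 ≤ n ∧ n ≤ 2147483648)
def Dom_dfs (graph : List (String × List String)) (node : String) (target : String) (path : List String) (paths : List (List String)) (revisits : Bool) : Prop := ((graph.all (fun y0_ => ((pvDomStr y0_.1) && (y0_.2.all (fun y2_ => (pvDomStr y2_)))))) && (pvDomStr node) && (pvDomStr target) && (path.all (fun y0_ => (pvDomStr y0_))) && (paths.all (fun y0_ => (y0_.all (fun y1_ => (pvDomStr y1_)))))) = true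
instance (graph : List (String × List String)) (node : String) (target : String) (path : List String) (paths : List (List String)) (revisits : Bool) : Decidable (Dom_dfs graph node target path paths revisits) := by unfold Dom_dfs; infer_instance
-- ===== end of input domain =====

-- B replaces A's recursion on a shared mutable path by an iterative DFS over an
-- explicit stack of (node, path-copy, revisits) frames; same return value in the same
-- order (A also mutates `path`/`paths` in place, B's Python only appends to `paths`).

-- str.islower(): at least one cased character and none uppercase; exact on the ASCII domain
-- (shared exact primitive, used by both ports like a PySem function).
def pyStrIslower (s : String) : Bool :=
  s.toList.any (fun c => c.isAlpha) && s.toList.all (fun c => !(c.isUpper))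

-- fuel making both ports total; under Pre_dfs the Python recursion depth (= B's frame
-- depth) never reaches it, so it is never exhausted there.
def fuelOf (graph : List (String × List String)) (path : List String) : Nat :=
  2 * (graph.length + (graph.map (fun p => p.2.length)).sum) + path.length + 16

-- ===== PORT A =====
def dfsFuel (fuel : Nat) (graph : List (String × List String)) (node : String) (target : String) (path : List String) (paths : List (List String)) (revisits : Bool) : List (List String) :=
  match fuel with
  | 0 => paths
  | fuel + 1 =>
    let revisits := if path.contains node && pyStrIslower node then false else revisits
    let path2 := path ++ [node]
    if node == target then paths ++ [path2]
    else
      (((PySem.Dict.ofList graph).get? node).getD []).foldl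
        (fun acc nb =>
          let valid := if revisits then !(nb == "start")
                       else !(path2.contains nb && pyStrIslower nb)
          if valid then dfsFuel fuel graph nb target path2 acc revisits else acc)
        paths

def dfs (graph : List (String × List String)) (node : String) (target : String) (path : List String) (paths : List (List String)) (revisits : Bool) : List (List String) :=
  dfsFuel (fuelOf graph path) graph node target path paths revisits

-- ===== PORT B =====
-- Source B's neighbour validity test
def validNb (p2 : List String) (rev : Bool) (nb : String) : Bool :=
  if rev then nb != "start" else !(p2.contains nb && pyStrIslower nb)

-- bound on any frame's number of children, for the termination measure only
def degBound (graph : List (String × List String)) : Nat :=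
  (graph.map (fun p => p.2.length)).foldl max 0

-- every value of a dict built by insertions comes from the seed dict or the pair list
theorem values_foldl_insert_sub {K V : Type} [BEq K] [LawfulBEq K] :
    ∀ (l : List (K × V)) (d : PySem.Dict K V) (p : K × V),
      p ∈ (l.foldl (fun d kv => d.insert kv.1 kv.2) d).items →
        p.2 ∈ d.values ∨ p.2 ∈ l.map Prod.snd := by
  intro l
  induction l with
  | nil =>
    intro d p h
    left
    simp only [PySem.Dict.values]
    exact List.mem_map_of_mem (by simpa using h)
  | cons kv l ih =>
    intro d p h
    rcases ih _ p h with h' | h'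
    · rcases PySem.Dict.mem_values_insert _ _ _ _ h' with h'' | h''
      · right; simp [h'']
      · left; exact h''
    · right; simp [h']

-- the neighbour list looked up for any frame is at most degBound long (termination)
theorem nbs_len_le (graph : List (String × List String)) (nd : String) :
    (((PySem.Dict.ofList graph).get? nd).getD []).length ≤ degBound graph := by
  cases h : (PySem.Dict.ofList graph).get? nd with
  | none => simp
  | some nbs =>
    have hi : (nd, nbs) ∈ (PySem.Dict.ofList graph).items :=
      PySem.Dict.mem_items_of_get?_eq_some _ h
    have hsub := values_foldl_insert_sub graph (PySem.Dict.empty) (nd, nbs) hi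
    rcases hsub with h' | h'
    · simp [PySem.Dict.values, PySem.Dict.empty] at h'
    · have : nbs.length ∈ graph.map (fun p => p.2.length) := by
        rcases List.mem_map.1 h' with ⟨q, hq, hq2⟩
        exact List.mem_map.2 ⟨q, hq, by simp [hq2]⟩
      simpa using (PySem.List.le_foldl_max (graph.map (fun p => p.2.length)) 0).2 _ this

-- Source B's `while stack` loop. The list head is the stack top: Python appends
-- reversed(graph[nd]) and pops from the end, which with head-as-top is exactly
-- prepending the valid neighbours in their original order. Each frame carries the
-- fuel making the loop total (Python has no fuel; never exhausted under Pre_dfs).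
def runStack (graph : List (String × List String)) (target : String) : List (Nat × String × List String × Bool) → List (List String) → List (List String)
  | [], paths => paths
  | (0, _, _, _) :: rest, paths => runStack graph target rest paths
  | (f + 1, nd, p, rev) :: rest, paths =>
    let rev' := if p.contains nd && pyStrIslower nd then false else rev
    let p2 := p ++ [nd]
    if nd == target then runStack graph target rest (paths ++ [p2])
    else
      runStack graph target
        (((((PySem.Dict.ofList graph).get? nd).getD []).filter (validNb p2 rev')).map
            (fun nb => (f, nb, p2, rev')) ++ rest) paths
termination_by st _ => (st.map (fun fr => (degBound graph + 2) ^ fr.1)).sum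
decreasing_by
  all_goals simp
  all_goals
    (refine lt_of_le_of_lt ?_ (show degBound graph * (degBound graph + 2) ^ f < (degBound graph + 2) ^ (f + 1) from ?_)
     · rw [show ((fun fr => (degBound graph + 2) ^ fr.1) ∘ fun nb =>
             ((f : Nat), nb, p ++ [nd], (!decide (nd ∈ p) || !pyStrIslower nd) && rev))
           = (fun _ => (degBound graph + 2) ^ f) from rfl, List.map_const', List.sum_replicate,
           smul_eq_mul]
       exact Nat.mul_le_mul_right _ (le_trans (List.length_filter_le _ _) (nbs_len_le graph nd))
     · have hc : 0 < (degBound graph + 2) ^ f := by positivity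
       rw [pow_succ]
       nlinarith)

def dfs_alt (graph : List (String × List String)) (node : String) (target : String) (path : List String) (paths : List (List String)) (revisits : Bool) : List (List String) :=
  runStack graph target [(fuelOf graph path, node, path, revisits)] paths

-- ===== PRECONDITION & SPEC =====
-- Pre_dfs excludes exactly the defects on which the Python A raises: a visited cave name
-- absent from the dict (KeyError) and an edge between two revisitable (non-lowercase)
-- caves, around which the recursion never terminates (RecursionError); requiring the whole
-- graph clean is a slight narrowing, since A still returns when such a defect is
-- unreachable from the start node (cite in claim.json).
def Pre_dfs (graph : List (String × List String)) (node : String) (target : String) (path : List String) (paths : List (List String)) (revisits : Bool) : Prop :=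
  node = target ∨
  ((PySem.Dict.ofList graph).contains node = true ∧
    ∀ p ∈ graph,
      (pyStrIslower p.1 = false → ∀ v ∈ p.2, v = target ∨ pyStrIslower v = true) ∧
      (∀ v ∈ p.2, v = target ∨ (PySem.Dict.ofList graph).contains v = true))
instance (graph : List (String × List String)) (node : String) (target : String) (path : List String) (paths : List (List String)) (revisits : Bool) : Decidable (Pre_dfs graph node target path paths revisits) := by unfold Pre_dfs; infer_instance

def pvWitness_dfs : (List (String × List String)) × String × String × List String × List (List String) × Bool :=
  ([("start", ["a", "A"]), ("a", ["end", "A"]), ("A", ["a", "end"]), ("end", [])], "start", "end", [], [], true)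

def Spec_dfs (graph : List (String × List String)) (node : String) (target : String) (path : List String) (paths : List (List String)) (revisits : Bool) (out : List (List String)) : Prop := out = dfs_alt graph node target path paths revisits
instance (graph : List (String × List String)) (node : String) (target : String) (path : List String) (paths : List (List String)) (revisits : Bool) (out : List (List String)) : Decidable (Spec_dfs graph node target path paths revisits out) := by unfold Spec_dfs; infer_instance

-- ===== CLAIM (what is proved, stated in full; the proofs are below) =====
def Claim_equal_dfs : Prop := ∀ (graph : List (String × List String)) (node : String) (target : String) (path : List String) (paths : List (List String)) (revisits : Bool), Dom_dfs graph node target path paths revisits → Pre_dfs graph node target path paths revisits → Spec_dfs graph node target path paths revisits (dfs graph node target path paths revisits)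

-- ===== LEMMAS AND PROOFS =====

-- the stack machine folds A's recursion over its frames, in order
theorem runStack_eq_foldl (graph : List (String × List String)) (target : String)
    (st : List (Nat × String × List String × Bool)) (paths : List (List String)) :
    runStack graph target st paths
      = st.foldl (fun acc fr => dfsFuel fr.1 graph fr.2.1 target fr.2.2.1 acc fr.2.2.2) paths := by
  fun_induction runStack graph target st paths with
  | case1 paths => rfl
  | case2 a b c rest paths ih => simpa [dfsFuel] using ih
  | case3 f nd p rev rest paths p2 hcond ih =>
    rw [ih]
    simp only [List.foldl_cons, dfsFuel, hcond]
    rfl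
  | case4 f nd p rev rest paths rev' p2 hcond ih =>
    rw [ih, List.foldl_append, List.foldl_map, List.foldl_filter]
    simp only [List.foldl_cons]
    congr 1
    simp only [dfsFuel, hcond, Bool.false_eq_true, ite_false]
    rfl

-- ===== VERDICT (by name: the statement is the Claim_ definition above) =====
theorem dfs_spec : Claim_equal_dfs := by
  intro graph node target path paths revisits _ _
  unfold Spec_dfs dfs dfs_alt
  rw [runStack_eq_foldl]
  rfl
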